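-- pv_equiv track=rewrite | github.com/inveniosoftware/invenio | modules/bibformat/lib/bibformat_utils.py | get_contextual_content
-- ===== SOURCE A (Python) =====
-- def get_contextual_content(text, keywords, max_lines=2):
--     """
--     Returns some lines from a text contextually to the keywords in
--     'keywords_string'
--
--     @param text: the text from which we want to get contextual content
--     @param keywords: a list of keyword strings ("the context")
--     @param max_lines: the maximum number of line to return from the record
--     @return: a string
--     """
--
--     def grade_line(text_line, keywords):
--         """
--         Grades a line according to keywords.
--
--         grade = number of keywords in the line
--         """
--         grade = 0
--         for keyword in keywords:
--             grade += text_line.upper().count(keyword.upper())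
--
--         return grade
--
--     #Grade each line according to the keywords
--     lines = text.split('.')
--     #print 'lines: ',lines
--     weights = [grade_line(line, keywords) for line in lines]
--
--     #print 'line weights: ', weights
--     def grade_region(lines_weight):
--         """
--         Grades a region. A region is a set of consecutive lines.
--
--         grade = sum of weights of the line composing the region
--         """
--         grade = 0
--         for weight in lines_weight:
--             grade += weight
--         return grade
--
--     if max_lines > 1:
--         region_weights = []
--         for index_weight in range(len(weights)- max_lines + 1):
--             region_weights.append(grade_region(weights[index_weight:(index_weight+max_lines)]))
--
--         weights = region_weights
--     #print 'region weights: ',weights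
--     #Returns line with maximal weight, and (max_lines - 1) following lines.
--     index_with_highest_weight = 0
--     highest_weight = 0
--     i = 0
--     for weight in weights:
--         if weight > highest_weight:
--             index_with_highest_weight = i
--             highest_weight = weight
--         i += 1
--     #print 'highest weight', highest_weight
--
--     if index_with_highest_weight+max_lines > len(lines):
--         return lines[index_with_highest_weight:]
--     else:
--         return lines[index_with_highest_weight:index_with_highest_weight+max_lines]
-- ===== SOURCE B (Python) =====
-- def get_contextual_content(text, keywords, max_lines=2):
--     lines = text.split('.')
--     ups = [k.upper() for k in keywords]
--     weights = []
--     for line in lines: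
--         lu = line.upper()
--         weights.append(sum(lu.count(k) for k in ups))
--     if max_lines > 1:
--         # prefix sums: region weight = prefix[i+max_lines] - prefix[i]
--         prefix = [0]
--         for w in weights:
--             prefix.append(prefix[-1] + w)
--         weights = [prefix[i + max_lines] - prefix[i]
--                    for i in range(len(prefix) - max_lines)]
--     best_i = best = 0
--     for i, w in enumerate(weights):
--         if w > best:
--             best_i, best = i, w
--     end = best_i + max_lines
--     return lines[best_i:] if end > len(lines) else lines[best_i:end]
-- ===== Notes on version B (the rewrite author's own statement) =====
-- stated objective: alternative
-- what changed: Region weights are computed from a prefix-sum table (each window weight is prefix[i+max_lines]-prefix[i]) instead of re-summing a slice of line weights per window, and each line is upper-cased once with the keywords upper-cased once up front instead of re-upper-casing the line for every keyword.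
import Mathlib
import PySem

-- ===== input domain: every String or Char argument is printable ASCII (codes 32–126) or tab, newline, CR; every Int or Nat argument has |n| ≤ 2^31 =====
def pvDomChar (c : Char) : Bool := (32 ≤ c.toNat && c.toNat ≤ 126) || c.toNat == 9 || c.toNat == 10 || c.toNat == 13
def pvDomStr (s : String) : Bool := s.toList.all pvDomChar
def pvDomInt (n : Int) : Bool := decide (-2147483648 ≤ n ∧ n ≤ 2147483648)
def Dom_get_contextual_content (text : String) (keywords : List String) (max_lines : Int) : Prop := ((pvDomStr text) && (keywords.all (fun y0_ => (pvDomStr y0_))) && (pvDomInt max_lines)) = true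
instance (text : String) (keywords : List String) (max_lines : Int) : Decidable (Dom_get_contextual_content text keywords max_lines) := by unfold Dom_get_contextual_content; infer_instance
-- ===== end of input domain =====

-- B replaces A's per-region re-summation of line weights by a prefix-sum table (and hoists
-- the repeated upper-casing out of the keyword loop); objective: alternative algorithm, same result.


-- ===== PORT A =====
-- grade_line: for each keyword, grade += line.upper().count(keyword.upper())
def pvGradeLine (line : String) (keywords : List String) : Int :=
  keywords.foldl (fun g k => g + (PySem.Str.count (PySem.Str.upper line) (PySem.Str.upper k) : Int)) 0

-- grade_region: sum of the weights of the region's lines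
def pvGradeRegion (ws : List Int) : Int :=
  ws.foldl (fun g w => g + w) 0

def get_contextual_content (text : String) (keywords : List String) (max_lines : Int) : List String :=
  let lines := (PySem.Str.split? text ".").getD []
  let weights := lines.map (fun line => pvGradeLine line keywords)
  let weights :=
    if max_lines > 1 then
      (PySem.List.pyRange 0 ((weights.length : Int) - max_lines + 1) 1).foldl
        (fun acc i => acc ++ [pvGradeRegion (PySem.List.slice weights (some i) (some (i + max_lines)))]) []
    else weights
  let st := weights.foldl
    (fun (s : Int × Int × Int) w =>
      if w > s.2.1 then (s.2.2, w, s.2.2 + 1) else (s.1, s.2.1, s.2.2 + 1)) ((0 : Int), (0 : Int), (0 : Int))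
  if st.1 + max_lines > (lines.length : Int) then
    PySem.List.slice lines (some st.1) none
  else
    PySem.List.slice lines (some st.1) (some (st.1 + max_lines))

-- ===== PORT B =====
def get_contextual_content_alt (text : String) (keywords : List String) (max_lines : Int) : List String :=
  let lines := (PySem.Str.split? text ".").getD []
  let ups := keywords.map PySem.Str.upper
  let weights := lines.foldl
    (fun acc line => acc ++ [(ups.map (fun k => (PySem.Str.count (PySem.Str.upper line) k : Int))).sum]) []
  let weights :=
    if max_lines > 1 then
      let pfx := weights.foldl (fun p w => p ++ [PySem.List.pyGetD p (-1) 0 + w]) [(0 : Int)]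
      (PySem.List.pyRange 0 ((pfx.length : Int) - max_lines) 1).map
        (fun i => PySem.List.pyGetD pfx (i + max_lines) 0 - PySem.List.pyGetD pfx i 0)
    else weights
  let st := (PySem.List.enumerate weights 0).foldl
    (fun (s : Int × Int) p => if p.2 > s.2 then (p.1, p.2) else s) ((0 : Int), (0 : Int))
  if st.1 + max_lines > (lines.length : Int) then
    PySem.List.slice lines (some st.1) none
  else
    PySem.List.slice lines (some st.1) (some (st.1 + max_lines))

-- ===== PRECONDITION & SPEC =====
def Spec_get_contextual_content (text : String) (keywords : List String) (max_lines : Int) (out : List String) : Prop := out = get_contextual_content_alt text keywords max_lines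
instance (text : String) (keywords : List String) (max_lines : Int) (out : List String) : Decidable (Spec_get_contextual_content text keywords max_lines out) := by unfold Spec_get_contextual_content; infer_instance

-- ===== CLAIM (what is proved, stated in full; the proofs are below) =====
def Claim_equal_get_contextual_content : Prop := ∀ (text : String) (keywords : List String) (max_lines : Int), Dom_get_contextual_content text keywords max_lines → Spec_get_contextual_content text keywords max_lines (get_contextual_content text keywords max_lines)

-- ===== LEMMAS AND PROOFS =====

-- the per-line weights coincide
theorem pv_weights_eq (keywords : List String) (line : String) :
    pvGradeLine line keywords
      = ((keywords.map PySem.Str.upper).map (fun k => (PySem.Str.count (PySem.Str.upper line) k : Int))).sum := by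
  unfold pvGradeLine
  rw [PySem.List.foldl_add (g := fun k => (PySem.Str.count (PySem.Str.upper line) (PySem.Str.upper k) : Int))]
  simp [List.map_map, Function.comp_def]

-- B's prefix loop builds exact prefix sums
def pvSumsFrom (a : Int) : List Int → List Int
  | [] => []
  | x :: t => (a + x) :: pvSumsFrom (a + x) t

theorem pv_pfx_char (w : List Int) : ∀ (p : List Int) (a : Int),
    w.foldl (fun p w => p ++ [PySem.List.pyGetD p (-1) 0 + w]) (p ++ [a])
      = p ++ [a] ++ pvSumsFrom a w := by
  induction w with
  | nil => intro p a; simp [pvSumsFrom]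
  | cons x t ih =>
    intro p a
    simp only [List.foldl_cons, PySem.List.pyGetD_neg_one_append_singleton, pvSumsFrom]
    have := ih (p ++ [a]) (a + x)
    simpa [List.append_assoc] using this

theorem pv_sumsFrom_getD (w : List Int) : ∀ (a : Int) (j : Nat), j ≤ w.length →
    (a :: pvSumsFrom a w).getD j 0 = a + (w.take j).sum := by
  induction w with
  | nil =>
    intro a j hj
    have hj0 : j = 0 := Nat.le_zero.mp hj
    subst hj0; simp [pvSumsFrom]
  | cons x t ih =>
    intro a j hj
    cases j with
    | zero => simp
    | succ j =>
      simp only [pvSumsFrom, List.getD_cons_succ, List.take_succ_cons, List.sum_cons]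
      rw [ih (a + x) j (by simpa using hj)]
      ring

theorem pv_pfx_getD (w : List Int) (j : Nat) (hj : j ≤ w.length) :
    (w.foldl (fun p w => p ++ [PySem.List.pyGetD p (-1) 0 + w]) [(0 : Int)]).getD j 0
      = (w.take j).sum := by
  have h := pv_pfx_char w [] 0
  simp only [List.nil_append] at h
  rw [h]
  simpa using pv_sumsFrom_getD w 0 j hj

theorem pv_pfx_length (w : List Int) :
    (w.foldl (fun p w => p ++ [PySem.List.pyGetD p (-1) 0 + w]) [(0 : Int)]).length = w.length + 1 := by
  have h := pv_pfx_char w [] 0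
  simp only [List.nil_append] at h
  rw [h]
  have : ∀ (v : List Int) (a : Int), (pvSumsFrom a v).length = v.length := by
    intro v; induction v with
    | nil => intro a; simp [pvSumsFrom]
    | cons x t ih => intro a; simp [pvSumsFrom, ih]
  simp [this]

-- a window sum is a difference of prefix sums
theorem pv_window_sum (w : List Int) (i m : Nat) (_h : i + m ≤ w.length) :
    ((w.drop i).take m).sum = (w.take (i + m)).sum - (w.take i).sum := by
  have h2 : w.take (i + m) = w.take i ++ (w.drop i).take m := List.take_add
  rw [h2, List.sum_append]; ring

-- grade_region is a plain sum
theorem pv_gradeRegion_sum (ws : List Int) : pvGradeRegion ws = ws.sum := by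
  unfold pvGradeRegion
  rw [PySem.List.foldl_add (g := fun w => w)]
  simp

-- the two argmax scans agree (A carries its own counter, B enumerates)
theorem pv_scan_eq (ws : List Int) : ∀ (idx hw i0 : Int),
    ((PySem.List.enumerate ws i0).foldl
        (fun (s : Int × Int) p => if p.2 > s.2 then (p.1, p.2) else s) (idx, hw))
      = ((ws.foldl (fun (s : Int × Int × Int) w =>
            if w > s.2.1 then (s.2.2, w, s.2.2 + 1) else (s.1, s.2.1, s.2.2 + 1)) (idx, hw, i0)).1,
         (ws.foldl (fun (s : Int × Int × Int) w =>
            if w > s.2.1 then (s.2.2, w, s.2.2 + 1) else (s.1, s.2.1, s.2.2 + 1)) (idx, hw, i0)).2.1) := by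
  induction ws with
  | nil => intro idx hw i0; simp [PySem.List.enumerate_nil]
  | cons x t ih =>
    intro idx hw i0
    rw [PySem.List.enumerate_cons]
    simp only [List.foldl_cons]
    by_cases h : x > hw <;> simp [h, ih]

-- the region-weight lists agree
theorem pv_regions_eq (w : List Int) (m : Int) (hm : 1 < m) :
    (PySem.List.pyRange 0 ((w.length : Int) - m + 1) 1).foldl
        (fun acc i => acc ++ [pvGradeRegion (PySem.List.slice w (some i) (some (i + m)))]) []
      = (PySem.List.pyRange 0
            (((w.foldl (fun p w => p ++ [PySem.List.pyGetD p (-1) 0 + w]) [(0 : Int)]).length : Int) - m) 1).map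
          (fun i => PySem.List.pyGetD (w.foldl (fun p w => p ++ [PySem.List.pyGetD p (-1) 0 + w]) [(0 : Int)]) (i + m) 0
                  - PySem.List.pyGetD (w.foldl (fun p w => p ++ [PySem.List.pyGetD p (-1) 0 + w]) [(0 : Int)]) i 0) := by
  set pfx := w.foldl (fun p w => p ++ [PySem.List.pyGetD p (-1) 0 + w]) [(0 : Int)] with hpfx
  rw [PySem.List.foldl_append_singleton_eq_map, List.nil_append]
  have hlen : ((pfx.length : Int) - m) = ((w.length : Int) - m + 1) := by
    rw [hpfx, pv_pfx_length]; push_cast; ring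
  rw [hlen]
  apply List.map_congr_left
  intro i hi
  rw [PySem.List.mem_pyRange_one] at hi
  obtain ⟨h0, h1⟩ := hi
  -- i and i+m are in-range nonnegative indices
  obtain ⟨a, rfl⟩ : ∃ a : Nat, i = (a : Int) := ⟨i.toNat, (Int.toNat_of_nonneg h0).symm⟩
  obtain ⟨b, rfl⟩ : ∃ b : Nat, m = (b : Int) := ⟨m.toNat, (Int.toNat_of_nonneg (by omega)).symm⟩
  have hab : a + b ≤ w.length := by omega
  rw [pv_gradeRegion_sum, PySem.List.slice_natCast_add, hpfx]
  rw [show ((a : Int) + (b : Int)) = ((a + b : Nat) : Int) by push_cast; ring]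
  rw [PySem.List.pyGetD_natCast, PySem.List.pyGetD_natCast]
  rw [pv_pfx_getD w (a + b) hab, pv_pfx_getD w a (by omega)]
  exact pv_window_sum w a b hab

-- ===== VERDICT (by name: the statement is the Claim_ definition above) =====
theorem get_contextual_content_spec : Claim_equal_get_contextual_content := by
  intro text keywords max_lines _
  unfold Spec_get_contextual_content get_contextual_content get_contextual_content_alt
  simp only []
  have hWB : ((PySem.Str.split? text ".").getD []).foldl
        (fun acc line => acc ++ [((keywords.map PySem.Str.upper).map
            (fun k => (PySem.Str.count (PySem.Str.upper line) k : Int))).sum]) []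
      = ((PySem.Str.split? text ".").getD []).map (fun line => pvGradeLine line keywords) := by
    rw [PySem.List.foldl_append_singleton_eq_map, List.nil_append]
    apply List.map_congr_left; intro line _; exact (pv_weights_eq keywords line).symm
  rw [hWB]
  set lines := (PySem.Str.split? text ".").getD []
  set w := lines.map (fun line => pvGradeLine line keywords) with hw
  by_cases hm : max_lines > 1
  · simp only [hm, if_true]
    rw [← pv_regions_eq w max_lines hm]
    rw [pv_scan_eq]
  · simp only [hm, if_false]
    rw [pv_scan_eq]
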